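-- pv_equiv track=rewrite | github.com/HaihuaQiu/capstone_project | util.py | decode_sparse_tensor
-- ===== SOURCE A (Python) =====
-- def decode_sparse_tensor(sparse_tensor):
--     decoded_indexes = list()
--     current_i = 0
--     current_seq = []
--     for offset, i_and_index in enumerate(sparse_tensor[0]):
--         i = i_and_index[0]
--         if i != current_i:
--             decoded_indexes.append(current_seq)
--             current_i = i
--             current_seq = list()
--         current_seq.append(offset)
--     decoded_indexes.append(current_seq)
--     result = []
--     real_label='0123456789+-*=()'
--     for index in decoded_indexes:
--         result.append(decode_a_seq(index, sparse_tensor,real_label))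
--     return result
--
-- def decode_a_seq(indexes, spars_tensor,real_label):
--     decoded = []
--     for m in indexes:
--         stri = real_label[spars_tensor[1][m]]
--         decoded.append(stri)
--     return decoded
-- ===== SOURCE B (Python) =====
-- def decode_sparse_tensor(sparse_tensor):
--     # Single fused pass over zip(indices, values): emits label strings directly,
--     # no intermediate offset groups and no helper.
--     real_label = '0123456789+-*=()'
--     result = []
--     current_i = 0
--     current_seq = []
--     for row, v in zip(sparse_tensor[0], sparse_tensor[1]):
--         if row[0] != current_i:
--             result.append(current_seq)
--             current_i = row[0]
--             current_seq = []
--         current_seq.append(real_label[v])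
--     result.append(current_seq)
--     return result
-- ===== Notes on version B (the rewrite author's own statement) =====
-- stated objective: simpler
-- what changed: B replaces A's two passes (first build lists of offsets per group, then re-index into sparse_tensor[1] via a decode_a_seq helper) with a single pass over zip(indices, values) that appends the decoded label string directly, eliminating the intermediate offset groups and the helper.
-- outside the precondition, e.g. on decode_sparse_tensor(([[0]], [20])): A raises IndexError, B raises IndexError; on decode_sparse_tensor(([[], [0]], [1, 2])): A raises IndexError, B raises IndexError; on decode_sparse_tensor(([[0], [0]], [1])): A raises IndexError, B returns [['1']]
import Mathlib
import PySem

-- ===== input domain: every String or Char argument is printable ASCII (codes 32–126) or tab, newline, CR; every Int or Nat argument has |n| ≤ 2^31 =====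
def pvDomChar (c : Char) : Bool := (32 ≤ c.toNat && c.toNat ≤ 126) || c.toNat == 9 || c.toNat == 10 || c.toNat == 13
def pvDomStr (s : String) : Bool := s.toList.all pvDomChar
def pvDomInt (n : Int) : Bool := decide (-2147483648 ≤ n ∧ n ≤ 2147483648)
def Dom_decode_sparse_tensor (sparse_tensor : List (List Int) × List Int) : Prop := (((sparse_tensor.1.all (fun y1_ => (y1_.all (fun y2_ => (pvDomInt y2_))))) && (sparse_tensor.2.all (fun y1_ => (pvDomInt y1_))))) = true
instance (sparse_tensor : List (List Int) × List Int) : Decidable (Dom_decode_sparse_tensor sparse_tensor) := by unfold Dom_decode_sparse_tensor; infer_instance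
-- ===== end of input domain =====

-- B fuses A's two passes (group offsets, then decode each group via a helper) into one
-- pass over zip(indices, values) that emits label strings directly; objective: simpler.

-- ===== PORT A =====
-- real_label[spars_tensor[1][m]]: list index then string index, both total via pyGetD;
-- exact whenever both indexes are in Python range (incl. negative string index), which Pre_ guarantees.
def decode_a_seq (indexes : List Int) (spars_tensor : List (List Int) × List Int)
    (real_label : String) : List String :=
  indexes.foldl (fun decoded m =>
    decoded ++ [String.ofList [PySem.List.pyGetD real_label.toList
      (PySem.List.pyGetD spars_tensor.2 m 0) '?']]) []

def decode_sparse_tensor (sparse_tensor : List (List Int) × List Int) : List (List String) :=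
  -- state: (decoded_indexes, current_i, current_seq)
  let s := (PySem.List.enumerate sparse_tensor.1).foldl
    (fun (acc : List (List Int) × Int × List Int) p =>
      let i := PySem.List.pyGetD p.2 0 0     -- i_and_index[0]; Pre_ guarantees the row is nonempty
      let acc' := if i ≠ acc.2.1 then (acc.1 ++ [acc.2.2], i, ([] : List Int)) else acc
      (acc'.1, acc'.2.1, acc'.2.2 ++ [p.1]))
    ([], 0, [])
  let decoded_indexes := s.1 ++ [s.2.2]
  decoded_indexes.foldl (fun result index =>
    result ++ [decode_a_seq index sparse_tensor "0123456789+-*=()"]) []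

-- ===== PORT B =====
def decode_sparse_tensor_alt (sparse_tensor : List (List Int) × List Int) : List (List String) :=
  let real_label := "0123456789+-*=()"
  -- state: (result, current_i, current_seq); real_label[v] via pyGetD as in port A
  let s := (sparse_tensor.1.zip sparse_tensor.2).foldl
    (fun (acc : List (List String) × Int × List String) p =>
      let i := PySem.List.pyGetD p.1 0 0
      let acc' := if i ≠ acc.2.1 then (acc.1 ++ [acc.2.2], i, ([] : List String)) else acc
      (acc'.1, acc'.2.1, acc'.2.2 ++ [String.ofList [PySem.List.pyGetD real_label.toList p.2 '?']]))
    ([], 0, [])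
  s.1 ++ [s.2.2]

-- ===== PRECONDITION & SPEC =====
-- Pre_ excludes exactly the inputs on which Python A raises: an empty row in sparse_tensor[0]
-- (IndexError on i_and_index[0]), fewer values than index rows (IndexError on sparse_tensor[1][m]),
-- or a used value outside the valid Python index range of the 16-char label string.
def Pre_decode_sparse_tensor (sparse_tensor : List (List Int) × List Int) : Prop :=
  (∀ row ∈ sparse_tensor.1, row ≠ []) ∧
  sparse_tensor.1.length ≤ sparse_tensor.2.length ∧
  (∀ v ∈ sparse_tensor.2.take sparse_tensor.1.length, -16 ≤ v ∧ v < 16)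
instance (sparse_tensor : List (List Int) × List Int) : Decidable (Pre_decode_sparse_tensor sparse_tensor) := by
  unfold Pre_decode_sparse_tensor; infer_instance

def pvWitness_decode_sparse_tensor : (List (List Int) × List Int) := ([[0], [0], [1]], [1, 12, 3])

def Spec_decode_sparse_tensor (sparse_tensor : List (List Int) × List Int) (out : List (List String)) : Prop := out = decode_sparse_tensor_alt sparse_tensor
instance (sparse_tensor : List (List Int) × List Int) (out : List (List String)) : Decidable (Spec_decode_sparse_tensor sparse_tensor out) := by unfold Spec_decode_sparse_tensor; infer_instance

-- ===== CLAIM (what is proved, stated in full; the proofs are below) =====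
def Claim_equal_decode_sparse_tensor : Prop := ∀ (sparse_tensor : List (List Int) × List Int), Dom_decode_sparse_tensor sparse_tensor → Pre_decode_sparse_tensor sparse_tensor → Spec_decode_sparse_tensor sparse_tensor (decode_sparse_tensor sparse_tensor)

-- ===== LEMMAS AND PROOFS =====

-- the label of offset m (both programs compute this value for each kept offset)
def pvLab (vals : List Int) (m : Int) : String :=
  String.ofList [PySem.List.pyGetD "0123456789+-*=()".toList (PySem.List.pyGetD vals m 0) '?']

-- the two folds, named so the invariant lemma can speak about them
def pvStepA (acc : List (List Int) × Int × List Int) (p : Int × List Int) :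
    List (List Int) × Int × List Int :=
  let i := PySem.List.pyGetD p.2 0 0
  let acc' := if i ≠ acc.2.1 then (acc.1 ++ [acc.2.2], i, ([] : List Int)) else acc
  (acc'.1, acc'.2.1, acc'.2.2 ++ [p.1])

def pvStepB (acc : List (List String) × Int × List String) (p : List Int × Int) :
    List (List String) × Int × List String :=
  let i := PySem.List.pyGetD p.1 0 0
  let acc' := if i ≠ acc.2.1 then (acc.1 ++ [acc.2.2], i, ([] : List String)) else acc
  (acc'.1, acc'.2.1, acc'.2.2 ++ [String.ofList [PySem.List.pyGetD "0123456789+-*=()".toList p.2 '?']])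

-- invariant: B's fold state is A's fold state with every stored offset replaced by its label
theorem pv_fold_inv (idx : List (List Int)) (vals : List Int) (s : Nat)
    (h : s + idx.length ≤ vals.length)
    (dA : List (List Int)) (cur : Int) (qA : List Int) :
    (idx.zip (vals.drop s)).foldl pvStepB
        (dA.map (List.map (pvLab vals)), cur, qA.map (pvLab vals)) =
      (((PySem.List.enumerate idx (s : Int)).foldl pvStepA (dA, cur, qA)).1.map (List.map (pvLab vals)),
       ((PySem.List.enumerate idx (s : Int)).foldl pvStepA (dA, cur, qA)).2.1,
       ((PySem.List.enumerate idx (s : Int)).foldl pvStepA (dA, cur, qA)).2.2.map (pvLab vals)) := by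
  induction idx generalizing s dA cur qA with
  | nil => simp [PySem.List.enumerate_nil]
  | cons row t ih =>
    have hs : s < vals.length := by simp at h; omega
    have hdrop : vals.drop s = vals[s] :: vals.drop (s + 1) := by
      rw [List.drop_eq_getElem_cons hs]
    have hlab : String.ofList [PySem.List.pyGetD "0123456789+-*=()".toList vals[s] '?'] =
        pvLab vals (s : Int) := by
      simp [pvLab, PySem.List.pyGetD_natCast, List.getD_eq_getElem?_getD, hs]
    rw [PySem.List.enumerate_cons, hdrop]
    simp only [List.zip_cons_cons, List.foldl_cons]
    by_cases hb : PySem.List.pyGetD row 0 0 ≠ cur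
    · simp only [pvStepA, pvStepB, if_pos hb, hlab]
      have := ih (s + 1) (by simp at h ⊢; omega) (dA ++ [qA]) (PySem.List.pyGetD row 0 0) [(s : Int)]
      simpa [List.map_append, Int.natCast_add] using this
    · simp only [pvStepA, pvStepB, if_neg hb, hlab]
      have := ih (s + 1) (by simp at h ⊢; omega) dA cur (qA ++ [(s : Int)])
      simpa [List.map_append, Int.natCast_add] using this

theorem decode_a_seq_eq_map (l : List Int) (st : List (List Int) × List Int) :
    decode_a_seq l st "0123456789+-*=()" = l.map (pvLab st.2) := by
  simpa [decode_a_seq, pvLab] using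
    PySem.List.foldl_append_singleton_eq_map
      (f := fun m => String.ofList [PySem.List.pyGetD "0123456789+-*=()".toList
        (PySem.List.pyGetD st.2 m 0) '?']) (l := l) (acc := [])

-- ===== VERDICT (by name: the statement is the Claim_ definition above) =====
theorem decode_sparse_tensor_spec : Claim_equal_decode_sparse_tensor := by
  intro st _hdom hpre
  obtain ⟨_hrows, hlen, _hvals⟩ := hpre
  unfold Spec_decode_sparse_tensor decode_sparse_tensor decode_sparse_tensor_alt
  have hinv := pv_fold_inv st.1 st.2 0 (by omega) [] 0 []
  norm_num at hinv
  simp only [show ∀ acc p, (fun (acc : List (List Int) × Int × List Int) (p : Int × List Int) =>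
      let i := PySem.List.pyGetD p.2 0 0
      let acc' := if i ≠ acc.2.1 then (acc.1 ++ [acc.2.2], i, ([] : List Int)) else acc
      (acc'.1, acc'.2.1, acc'.2.2 ++ [p.1])) acc p = pvStepA acc p from fun _ _ => rfl]
  simp only [show ∀ acc p, (fun (acc : List (List String) × Int × List String) (p : List Int × Int) =>
      let i := PySem.List.pyGetD p.1 0 0
      let acc' := if i ≠ acc.2.1 then (acc.1 ++ [acc.2.2], i, ([] : List String)) else acc
      (acc'.1, acc'.2.1, acc'.2.2 ++ [String.ofList [PySem.List.pyGetD "0123456789+-*=()".toList p.2 '?']]))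
      acc p = pvStepB acc p from fun _ _ => rfl]
  simp only [show (fun acc p => pvStepA acc p) = pvStepA from rfl,
    show (fun acc p => pvStepB acc p) = pvStepB from rfl]
  rw [hinv]
  rw [PySem.List.foldl_append_singleton_eq_map
    (f := fun index => decode_a_seq index st "0123456789+-*=()")]
  simp [decode_a_seq_eq_map, List.map_append]
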